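-- pv_equiv track=rewrite | github.com/ojasvajadon/NER-Studio-Named-Entity-Recognition-System | train_ner.py | parse_iob_entities
-- ===== SOURCE A (Python) =====
-- def _resolve_label(raw_label: str, label_map: dict[str, str]) -> str | None:
--     normalized = raw_label.strip()
--     if not normalized:
--         return None
--     for key in (normalized, normalized.lower(), normalized.upper()):
--         mapped = label_map.get(key)
--         if mapped:
--             return mapped
--     return label_map.get(normalized.lower())
--
-- def parse_iob_entities(tags: list[str], label_map: dict[str, str]) -> list[tuple[int, int, str]]:
--     entities: list[tuple[int, int, str]] = []
--     current_start = None
--     current_label = None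
--     previous_plain_label: str | None = None
--
--     for idx, raw_tag in enumerate(tags):
--         tag = (raw_tag or "O").strip()
--         if not tag or tag.upper() == "O":
--             if current_start is not None and current_label is not None:
--                 entities.append((current_start, idx, current_label))
--                 current_start = None
--                 current_label = None
--             previous_plain_label = None
--             continue
--
--         if "-" in tag:
--             prefix, raw_label = tag.split("-", 1)
--         else:
--             raw_label = tag
--             prefix = "I" if previous_plain_label == raw_label else "B"
--
--         mapped_label = _resolve_label(raw_label, label_map)
--         previous_plain_label = raw_label
--         if mapped_label is None:
--             if current_start is not None and current_label is not None:
--                 entities.append((current_start, idx, current_label))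
--                 current_start = None
--                 current_label = None
--             previous_plain_label = None
--             continue
--
--         prefix = prefix.upper()
--         if prefix == "B":
--             if current_start is not None and current_label is not None:
--                 entities.append((current_start, idx, current_label))
--             current_start = idx
--             current_label = mapped_label
--         elif prefix == "I":
--             if current_start is None or current_label != mapped_label:
--                 current_start = idx
--                 current_label = mapped_label
--         else:
--             if current_start is not None and current_label is not None:
--                 entities.append((current_start, idx, current_label))
--             current_start = idx
--             current_label = mapped_label
--
--     if current_start is not None and current_label is not None:
--         entities.append((current_start, len(tags), current_label))
--
--     return entities
-- ===== SOURCE B (Python) =====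
-- def _resolve_label(raw_label, label_map):
--     normalized = raw_label.strip()
--     if not normalized:
--         return None
--     for key in (normalized, normalized.lower(), normalized.upper()):
--         mapped = label_map.get(key)
--         if mapped:
--             return mapped
--     return label_map.get(normalized.lower())
--
-- def _classify_token(raw_tag, prev, label_map):
--     """Event at one position: (None, None) for a break, or ((is_inside, mapped_label), raw_label)."""
--     tag = (raw_tag or "O").strip()
--     if not tag or tag.upper() == "O":
--         return None, None
--     if "-" in tag:
--         prefix, raw_label = tag.split("-", 1)
--     else:
--         raw_label = tag
--         prefix = "I" if prev == raw_label else "B"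
--     mapped = _resolve_label(raw_label, label_map)
--     if mapped is None:
--         return None, None
--     return (prefix.upper() == "I", mapped), raw_label
--
-- def parse_iob_entities(tags, label_map):
--     # Pass 1: classify every position into a break (None) or a token event (is_inside, label).
--     events = []
--     prev = None
--     for raw_tag in tags:
--         ev, prev = _classify_token(raw_tag, prev, label_map)
--         events.append(ev)
--     # Pass 2: group consecutive token events into spans.
--     entities = []
--     span = None  # open span as a (start, label) pair
--     for idx, ev in enumerate(events):
--         if ev is None:
--             if span is not None:
--                 entities.append((span[0], idx, span[1]))
--                 span = None
--         elif ev[0]:  # inside: extend a matching span, else restart (dropping a mismatched open span)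
--             if span is None or span[1] != ev[1]:
--                 span = (idx, ev[1])
--         else:  # begin (or unknown prefix): close any open span, then open a new one
--             if span is not None:
--                 entities.append((span[0], idx, span[1]))
--             span = (idx, ev[1])
--     if span is not None:
--         entities.append((span[0], len(tags), span[1]))
--     return entities
-- ===== Notes on version B (the rewrite author's own statement) =====
-- stated objective: alternative
-- what changed: A's single loop threading four pieces of state (current_start, current_label, previous_plain_label, entities) is split into two passes: a per-token classifier that turns each position into a break/begin/inside event, and a separate grouping pass over the event list that maintains only one open (start, label) span.
import Mathlib
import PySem

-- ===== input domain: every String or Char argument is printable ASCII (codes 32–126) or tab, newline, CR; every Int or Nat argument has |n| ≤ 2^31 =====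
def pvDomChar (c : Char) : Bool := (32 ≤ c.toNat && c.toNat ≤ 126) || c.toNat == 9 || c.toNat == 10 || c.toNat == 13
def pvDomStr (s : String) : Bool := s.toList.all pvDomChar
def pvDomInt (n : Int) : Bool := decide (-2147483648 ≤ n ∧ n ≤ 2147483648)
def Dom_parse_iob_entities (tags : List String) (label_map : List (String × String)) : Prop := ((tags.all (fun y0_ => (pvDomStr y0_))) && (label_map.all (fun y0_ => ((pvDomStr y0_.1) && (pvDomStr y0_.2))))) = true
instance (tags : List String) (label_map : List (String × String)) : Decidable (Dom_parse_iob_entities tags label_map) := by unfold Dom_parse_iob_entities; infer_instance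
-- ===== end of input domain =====

-- B re-decomposes A's single stateful loop into two passes: classify each position into a
-- break / begin / inside event, then group consecutive events into spans (objective: alternative).


-- ===== PORT A =====
-- _resolve_label: identical helper text in Source A and Source B, so both ports cite this one definition.
-- the for-loop over the three candidate keys, with `if mapped:` (truthy = some non-empty string):
def resolveTry (keys : List String) (label_map : List (String × String)) : Option String :=
  match keys with
  | [] => none
  | k :: rest =>
    match List.lookup k label_map with  -- label_map.get(key); dict = assoc list, first match
    | some v => if v ≠ "" then some v else resolveTry rest label_map
    | none => resolveTry rest label_map

def resolve_label (raw_label : String) (label_map : List (String × String)) : Option String :=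
  let normalized := PySem.Str.strip raw_label
  if normalized = "" then none
  else
    match resolveTry [normalized, PySem.Str.lower normalized, PySem.Str.upper normalized] label_map with
    | some v => some v
    | none => List.lookup (PySem.Str.lower normalized) label_map

-- prefix/raw_label extraction shared by both ports (identical text in Source A and Source B):
-- tag.split("-", 1) when "-" in tag, else infer the prefix from the previous plain label.
def splitTag (tag : String) (prev : Option String) : String × String :=
  if PySem.Str.isIn "-" tag then
    match PySem.Str.splitMax? tag "-" 1 with
    | some (p :: r :: _) => (p, r)
    | _ => ("", "")  -- unreachable: sep "-" ≠ "" and "-" in tag gives exactly two parts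
  else
    (if prev = some tag then "I" else "B", tag)

-- one iteration of A's loop; state = (entities, current_start, current_label, previous_plain_label, idx);
-- tag = (raw_tag or "O").strip() and (prefix, raw_label) = splitTag tag prev are written inline
def stepA (label_map : List (String × String))
    (st : List (Int × Int × String) × Option Int × Option String × Option String × Int)
    (raw_tag : String) :
    List (Int × Int × String) × Option Int × Option String × Option String × Int :=
  if PySem.Str.strip (if raw_tag = "" then "O" else raw_tag) = ""
      ∨ PySem.Str.upper (PySem.Str.strip (if raw_tag = "" then "O" else raw_tag)) = "O" then
    match st.2.1, st.2.2.1 with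
    | some s, some l => (st.1 ++ [(s, st.2.2.2.2, l)], none, none, none, st.2.2.2.2 + 1)
    | _, _ => (st.1, st.2.1, st.2.2.1, none, st.2.2.2.2 + 1)
  else
    match resolve_label (splitTag (PySem.Str.strip (if raw_tag = "" then "O" else raw_tag)) st.2.2.2.1).2 label_map with
    | none =>
      match st.2.1, st.2.2.1 with
      | some s, some l => (st.1 ++ [(s, st.2.2.2.2, l)], none, none, none, st.2.2.2.2 + 1)
      | _, _ => (st.1, st.2.1, st.2.2.1, none, st.2.2.2.2 + 1)
    | some ml =>
      if PySem.Str.upper (splitTag (PySem.Str.strip (if raw_tag = "" then "O" else raw_tag)) st.2.2.2.1).1 = "B" then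
        match st.2.1, st.2.2.1 with
        | some s, some l => (st.1 ++ [(s, st.2.2.2.2, l)], some st.2.2.2.2, some ml,
            some (splitTag (PySem.Str.strip (if raw_tag = "" then "O" else raw_tag)) st.2.2.2.1).2, st.2.2.2.2 + 1)
        | _, _ => (st.1, some st.2.2.2.2, some ml,
            some (splitTag (PySem.Str.strip (if raw_tag = "" then "O" else raw_tag)) st.2.2.2.1).2, st.2.2.2.2 + 1)
      else if PySem.Str.upper (splitTag (PySem.Str.strip (if raw_tag = "" then "O" else raw_tag)) st.2.2.2.1).1 = "I" then
        if st.2.1 = none ∨ st.2.2.1 ≠ some ml then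
          (st.1, some st.2.2.2.2, some ml,
            some (splitTag (PySem.Str.strip (if raw_tag = "" then "O" else raw_tag)) st.2.2.2.1).2, st.2.2.2.2 + 1)
        else (st.1, st.2.1, st.2.2.1,
            some (splitTag (PySem.Str.strip (if raw_tag = "" then "O" else raw_tag)) st.2.2.2.1).2, st.2.2.2.2 + 1)
      else
        match st.2.1, st.2.2.1 with
        | some s, some l => (st.1 ++ [(s, st.2.2.2.2, l)], some st.2.2.2.2, some ml,
            some (splitTag (PySem.Str.strip (if raw_tag = "" then "O" else raw_tag)) st.2.2.2.1).2, st.2.2.2.2 + 1)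
        | _, _ => (st.1, some st.2.2.2.2, some ml,
            some (splitTag (PySem.Str.strip (if raw_tag = "" then "O" else raw_tag)) st.2.2.2.1).2, st.2.2.2.2 + 1)

def parse_iob_entities (tags : List String) (label_map : List (String × String)) : List (Int × Int × String) :=
  match tags.foldl (stepA label_map) ([], none, none, none, 0) with
  | (entities, some s, some l, _, _) => entities ++ [(s, (tags.length : Int), l)]
  | (entities, _, _, _, _) => entities

-- ===== PORT B =====
-- _classify_token: the event at one position (none = break, some (is_inside, mapped_label))
-- and the next previous_plain_label
def classifyTok (label_map : List (String × String)) (raw_tag : String) (prev : Option String) :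
    Option (Bool × String) × Option String :=
  if PySem.Str.strip (if raw_tag = "" then "O" else raw_tag) = ""
      ∨ PySem.Str.upper (PySem.Str.strip (if raw_tag = "" then "O" else raw_tag)) = "O" then (none, none)
  else
    match resolve_label (splitTag (PySem.Str.strip (if raw_tag = "" then "O" else raw_tag)) prev).2 label_map with
    | none => (none, none)
    | some ml =>
      (some (PySem.Str.upper (splitTag (PySem.Str.strip (if raw_tag = "" then "O" else raw_tag)) prev).1 = "I", ml),
       some (splitTag (PySem.Str.strip (if raw_tag = "" then "O" else raw_tag)) prev).2)

-- pass 1: classify every position, threading previous_plain_label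
def classify (label_map : List (String × String)) (prev : Option String) :
    List String → List (Option (Bool × String))
  | [] => []
  | raw_tag :: rest =>
    let evp := classifyTok label_map raw_tag prev
    evp.1 :: classify label_map evp.2 rest

-- pass 2, one iteration; state = (entities, open span, idx)
def stepB (st : List (Int × Int × String) × Option (Int × String) × Int)
    (ev : Option (Bool × String)) :
    List (Int × Int × String) × Option (Int × String) × Int :=
  match ev with
  | none =>
    match st.2.1 with
    | some (s, l) => (st.1 ++ [(s, st.2.2, l)], none, st.2.2 + 1)
    | none => (st.1, none, st.2.2 + 1)
  | some (true, ml) =>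
    match st.2.1 with
    | some (s, l) => if l ≠ ml then (st.1, some (st.2.2, ml), st.2.2 + 1) else (st.1, some (s, l), st.2.2 + 1)
    | none => (st.1, some (st.2.2, ml), st.2.2 + 1)
  | some (false, ml) =>
    match st.2.1 with
    | some (s, l) => (st.1 ++ [(s, st.2.2, l)], some (st.2.2, ml), st.2.2 + 1)
    | none => (st.1, some (st.2.2, ml), st.2.2 + 1)

def parse_iob_entities_alt (tags : List String) (label_map : List (String × String)) : List (Int × Int × String) :=
  match (classify label_map none tags).foldl stepB ([], none, 0) with
  | (entities, some (s, l), _) => entities ++ [(s, (tags.length : Int), l)]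
  | (entities, none, _) => entities

-- ===== PRECONDITION & SPEC =====
def Spec_parse_iob_entities (tags : List String) (label_map : List (String × String)) (out : List (Int × Int × String)) : Prop := out = parse_iob_entities_alt tags label_map
instance (tags : List String) (label_map : List (String × String)) (out : List (Int × Int × String)) : Decidable (Spec_parse_iob_entities tags label_map out) := by unfold Spec_parse_iob_entities; infer_instance

-- ===== CLAIM (what is proved, stated in full; the proofs are below) =====
def Claim_equal_parse_iob_entities : Prop := ∀ (tags : List String) (label_map : List (String × String)), Dom_parse_iob_entities tags label_map → Spec_parse_iob_entities tags label_map (parse_iob_entities tags label_map)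

-- ===== LEMMAS AND PROOFS =====

lemma classify_cons (label_map : List (String × String)) (raw_tag : String)
    (prev : Option String) (rest : List String) :
    classify label_map prev (raw_tag :: rest)
      = (classifyTok label_map raw_tag prev).1
          :: classify label_map (classifyTok label_map raw_tag prev).2 rest := rfl

-- one step of A, on a state whose (current_start, current_label) come from an optional pair,
-- is one step of B on the event classifyTok emits, with its next previous_plain_label
lemma stepA_tok (label_map : List (String × String)) (raw_tag : String)
    (entities : List (Int × Int × String)) (opt : Option (Int × String))
    (prev : Option String) (idx : Int) :
    stepA label_map (entities, opt.map Prod.fst, opt.map Prod.snd, prev, idx) raw_tag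
      = ((stepB (entities, opt, idx) (classifyTok label_map raw_tag prev).1).1,
         (stepB (entities, opt, idx) (classifyTok label_map raw_tag prev).1).2.1.map Prod.fst,
         (stepB (entities, opt, idx) (classifyTok label_map raw_tag prev).1).2.1.map Prod.snd,
         (classifyTok label_map raw_tag prev).2,
         (stepB (entities, opt, idx) (classifyTok label_map raw_tag prev).1).2.2) := by
  unfold stepA classifyTok
  generalize PySem.Str.strip (if raw_tag = "" then "O" else raw_tag) = tg
  by_cases h : tg = "" ∨ PySem.Str.upper tg = "O"
  · rw [if_pos h, if_pos h]
    rcases opt with _ | ⟨s, l⟩ <;> rfl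
  · rw [if_neg h, if_neg h]
    generalize splitTag tg prev = pr
    rcases hr : resolve_label pr.2 label_map with _ | ml
    · rcases opt with _ | ⟨s, l⟩ <;> rfl
    · by_cases hB : PySem.Str.upper pr.1 = "B"
      · have hI : ¬ PySem.Str.upper pr.1 = "I" := by rw [hB]; decide
        rcases opt with _ | ⟨s, l⟩ <;> simp [hB, stepB]
      · by_cases hI : PySem.Str.upper pr.1 = "I"
        · rcases opt with _ | ⟨s, l⟩
          · simp [hI, stepB]
          · by_cases hl : l = ml <;> simp [hI, hl, stepB]
        · rcases opt with _ | ⟨s, l⟩ <;> simp [hB, hI, stepB]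

-- A's fold simulates B's fold over the classified event list
lemma fold_sim (label_map : List (String × String)) :
    ∀ (tags : List String) (entities : List (Int × Int × String))
      (opt : Option (Int × String)) (prev : Option String) (idx : Int),
      ∃ p : Option String,
        tags.foldl (stepA label_map) (entities, opt.map Prod.fst, opt.map Prod.snd, prev, idx)
          = (((classify label_map prev tags).foldl stepB (entities, opt, idx)).1,
             ((classify label_map prev tags).foldl stepB (entities, opt, idx)).2.1.map Prod.fst,
             ((classify label_map prev tags).foldl stepB (entities, opt, idx)).2.1.map Prod.snd,
             p,
             ((classify label_map prev tags).foldl stepB (entities, opt, idx)).2.2) := by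
  intro tags
  induction tags with
  | nil => intro entities opt prev idx; exact ⟨prev, rfl⟩
  | cons raw rest ih =>
    intro entities opt prev idx
    rw [classify_cons]
    simp only [List.foldl_cons]
    rw [stepA_tok]
    rcases hB : stepB (entities, opt, idx) (classifyTok label_map raw prev).1 with ⟨e', rest'⟩
    rcases rest' with ⟨sp', i'⟩
    exact ih e' sp' (classifyTok label_map raw prev).2 i'

-- ===== VERDICT (by name: the statement is the Claim_ definition above) =====
theorem parse_iob_entities_spec : Claim_equal_parse_iob_entities := by
  intro tags label_map _
  unfold Spec_parse_iob_entities parse_iob_entities parse_iob_entities_alt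
  obtain ⟨p, hp⟩ := fold_sim label_map tags [] none none 0
  simp only [Option.map_none] at hp
  rcases hfold : (classify label_map none tags).foldl stepB ([], none, 0) with ⟨e, sp, i⟩
  rw [hfold] at hp
  rw [hp]
  cases sp with
  | none => rfl
  | some sl => obtain ⟨s, l⟩ := sl; rfl
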